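-- pv_equiv track=rewrite | github.com/ballmdr/lekdedai | app/lotto_stats/lotto_sync_service.py | _limit_field_length
-- ===== SOURCE A (Python) =====
-- def _limit_field_length(numbers, max_length):
--     """จำกัดความยาวของ field ให้ไม่เกิน max_length"""
--     if not numbers:
--         return ''
--
--     # เริ่มต้นด้วยตัวแรก
--     result = [str(numbers[0])]
--     current_length = len(result[0])
--
--     # เพิ่มตัวถัดไปถ้าความยาวยังไม่เกิน
--     for number in numbers[1:]:
--         number_str = str(number)
--         # +2 สำหรับ ", " ที่จะเพิ่ม
--         if current_length + len(number_str) + 2 <= max_length: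
--             result.append(number_str)
--             current_length += len(number_str) + 2
--         else:
--             break
--
--     return ', '.join(result)
-- ===== SOURCE B (Python) =====
-- def _limit_field_length(numbers, max_length):
--     """Measure-then-cut: compute joined-prefix lengths, count how many prefixes fit
--     (floored at 1 so the first element is always kept), then slice and join."""
--     if not numbers:
--         return ''
--     totals = []
--     acc = -2
--     for x in numbers:
--         acc += len(str(x)) + 2
--         totals.append(acc)
--     k = max(1, sum(1 for t in totals if t <= max_length))
--     return ', '.join(str(x) for x in numbers[:k])
-- ===== Notes on version B (the rewrite author's own statement) =====
-- stated objective: alternative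
-- what changed: Replaces A's interleaved accumulate-and-break loop over the tail with a measure-then-cut pipeline: build the list of joined-prefix lengths, count how many fit (floored at 1), then slice and join.
import Mathlib
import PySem

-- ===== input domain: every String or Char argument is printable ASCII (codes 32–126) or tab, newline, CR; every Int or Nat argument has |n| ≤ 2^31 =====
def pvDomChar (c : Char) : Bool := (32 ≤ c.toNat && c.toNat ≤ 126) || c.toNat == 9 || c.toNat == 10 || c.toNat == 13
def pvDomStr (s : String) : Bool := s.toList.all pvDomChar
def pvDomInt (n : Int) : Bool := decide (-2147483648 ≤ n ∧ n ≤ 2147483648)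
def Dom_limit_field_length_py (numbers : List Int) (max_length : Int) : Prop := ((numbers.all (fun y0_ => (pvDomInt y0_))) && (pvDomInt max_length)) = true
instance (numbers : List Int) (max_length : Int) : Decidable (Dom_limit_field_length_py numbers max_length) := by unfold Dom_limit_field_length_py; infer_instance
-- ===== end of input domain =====

-- B replaces A's accumulate-and-break loop by a measure-then-cut pipeline (alternative decomposition, same cost).

-- ===== PORT A =====
-- the 'for number in numbers[1:]' loop with its break
def lflA_loop (max_length : Int) : List Int → List String → Int → List String
  | [], result, _ => result
  | number :: rest, result, current_length =>
    let number_str := PySem.Int.toStr number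
    if current_length + PySem.Str.len number_str + 2 ≤ max_length then
      lflA_loop max_length rest (result ++ [number_str])
        (current_length + PySem.Str.len number_str + 2)
    else result

def limit_field_length_py (numbers : List Int) (max_length : Int) : String :=
  match numbers with
  | [] => ""
  | n0 :: rest =>
    let first := PySem.Int.toStr n0
    PySem.Str.join ", " (lflA_loop max_length rest [first] (PySem.Str.len first))

-- ===== PORT B =====
-- totals: running joined-prefix lengths, acc starts at -2
def lflB_totals : List Int → Int → List Int
  | [], _ => []
  | x :: rest, acc =>
    let acc' := acc + PySem.Str.len (PySem.Int.toStr x) + 2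
    acc' :: lflB_totals rest acc'

def limit_field_length_py_alt (numbers : List Int) (max_length : Int) : String :=
  match numbers with
  | [] => ""
  | _ :: _ =>
    let totals := lflB_totals numbers (-2)
    let k : Int := max 1 ((totals.filter (fun t => t ≤ max_length)).length : Int)
    PySem.Str.join ", " ((PySem.List.slice numbers none (some k)).map PySem.Int.toStr)

-- ===== PRECONDITION & SPEC =====
def Spec_limit_field_length_py (numbers : List Int) (max_length : Int) (out : String) : Prop := out = limit_field_length_py_alt numbers max_length
instance (numbers : List Int) (max_length : Int) (out : String) : Decidable (Spec_limit_field_length_py numbers max_length out) := by unfold Spec_limit_field_length_py; infer_instance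

-- ===== CLAIM (what is proved, stated in full; the proofs are below) =====
def Claim_equal_limit_field_length_py : Prop := ∀ (numbers : List Int) (max_length : Int), Dom_limit_field_length_py numbers max_length → Spec_limit_field_length_py numbers max_length (limit_field_length_py numbers max_length)

-- ===== LEMMAS AND PROOFS =====

-- how many tail elements A's loop takes, starting from running length cur
def lflCnt (m : Int) : List Int → Int → Nat
  | [], _ => 0
  | n :: rest, cur =>
    let L : Int := ((PySem.Int.toChars n).length : Int)
    if cur + L + 2 ≤ m then 1 + lflCnt m rest (cur + L + 2) else 0

theorem lflA_loop_eq (m : Int) (l : List Int) :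
    ∀ (result : List String) (cur : Int),
    lflA_loop m l result cur = result ++ (l.take (lflCnt m l cur)).map PySem.Int.toStr := by
  induction l with
  | nil => intro result cur; simp [lflA_loop, lflCnt]
  | cons n rest ih =>
    intro result cur
    simp only [lflA_loop, lflCnt, PySem.Str.len_eq, PySem.Int.toList_toStr]
    by_cases h : cur + ((PySem.Int.toChars n).length : Int) + 2 ≤ m
    · rw [if_pos h, if_pos h, ih, Nat.add_comm 1]
      simp [List.take_succ_cons]
    · rw [if_neg h, if_neg h]; simp

theorem lflCnt_zero (m : Int) (l : List Int) : ∀ cur, m < cur → lflCnt m l cur = 0 := by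
  cases l with
  | nil => intro cur _; rfl
  | cons n rest =>
    intro cur h
    simp only [lflCnt]
    rw [if_neg (by have : (0:Int) ≤ ((PySem.Int.toChars n).length : Int) := Int.natCast_nonneg _; omega)]

theorem lflB_totals_gt (l : List Int) :
    ∀ acc t, t ∈ lflB_totals l acc → acc < t := by
  induction l with
  | nil => intro acc t h; simp [lflB_totals] at h
  | cons x rest ih =>
    intro acc t h
    have hn : (0:Int) ≤ PySem.Str.len (PySem.Int.toStr x) := by
      rw [PySem.Str.len_eq]; exact Int.natCast_nonneg _
    simp only [lflB_totals, List.mem_cons] at h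
    rcases h with h | h
    · omega
    · have := ih _ _ h; omega

theorem lflB_filter_nil (m : Int) (l : List Int) (acc : Int) (h : m < acc) :
    (lflB_totals l acc).filter (fun t => t ≤ m) = [] := by
  rw [List.filter_eq_nil_iff]
  intro t ht
  have := lflB_totals_gt l acc t ht
  simp only [decide_eq_true_eq]
  omega

theorem lfl_count_eq (m : Int) (l : List Int) :
    ∀ acc, ((lflB_totals l acc).filter (fun t => t ≤ m)).length = lflCnt m l acc := by
  induction l with
  | nil => intro acc; rfl
  | cons n rest ih =>
    intro acc
    simp only [lflB_totals, lflCnt, List.filter_cons, PySem.Str.len_eq, PySem.Int.toList_toStr]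
    by_cases h : acc + ((PySem.Int.toChars n).length : Int) + 2 ≤ m
    · rw [if_pos h, if_pos (by simpa using h)]
      simp [ih]
      omega
    · rw [if_neg h, if_neg (by simpa using h),
        lflB_filter_nil m rest _ (by omega)]
      simp

-- ===== VERDICT (by name: the statement is the Claim_ definition above) =====
theorem limit_field_length_py_spec : Claim_equal_limit_field_length_py := by
  intro numbers m _
  unfold Spec_limit_field_length_py limit_field_length_py limit_field_length_py_alt
  cases numbers with
  | nil => rfl
  | cons n0 rest =>
    simp only [lflA_loop_eq]
    set L0 : Int := ((PySem.Int.toChars n0).length : Int) with hL0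
    have hlen : PySem.Str.len (PySem.Int.toStr n0) = L0 := by
      rw [PySem.Str.len_eq, PySem.Int.toList_toStr]
    have hL0n : 0 ≤ L0 := Int.natCast_nonneg _
    have htot : lflB_totals (n0 :: rest) (-2) = L0 :: lflB_totals rest L0 := by
      simp only [lflB_totals, hlen]
      have h2 : -2 + L0 + 2 = L0 := by ring
      rw [h2]
    rw [hlen, htot, List.filter_cons]
    by_cases h0 : L0 ≤ m
    · have hc := lfl_count_eq m rest L0
      rw [if_pos (by simpa using h0)]
      rw [List.length_cons, hc]
      have hk : max 1 (((lflCnt m rest L0 + 1 : Nat)) : Int) = ((lflCnt m rest L0 + 1 : Nat) : Int) := by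
        omega
      rw [hk, PySem.List.slice_to _ (by positivity)]
      have h3 : (((lflCnt m rest L0 + 1 : Nat)) : Int).toNat = lflCnt m rest L0 + 1 := by omega
      rw [h3]
      simp [List.take_succ_cons]
    · have hnil : (lflB_totals rest L0).filter (fun t => t ≤ m) = [] :=
        lflB_filter_nil m rest L0 (by omega)
      rw [if_neg (by simpa using h0), hnil]
      have hcz : lflCnt m rest L0 = 0 := lflCnt_zero m rest L0 (by omega)
      rw [hcz]
      have h4 : max 1 ((([] : List Int).length : Int)) = (1 : Int) := by simp
      rw [h4, PySem.List.slice_to _ (by norm_num)]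
      simp
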